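/- GENERATED by tools/from_farm_form.py from prooffarm-gif/accepted/digest_int/Proof.lean (a worked proof of the farm's unit `digest_int`,
   accepted by the verdict) — do not edit. -/
import Gif.Spec.AllSegs
import Gif.Spec.Units.digest_int

/-!
  `digest_int` (0x1052e0, 17 instructions; gif_driver.c:95-102) satisfies its contract, from the contract of `digest_byte`:

      entry ── push rbx ─ mov ebx, esi ─ digest_byte(h, v)        ─ ret1
            ── mov rdi, rax ─ esi = ebx >> 8  ─ digest_byte       ─ ret2
            ── mov rdi, rax ─ esi = ebx >> 16 ─ digest_byte       ─ ret3
            ── mov rdi, rax ─ ebx >>= 24 ; esi = ebx ─ digest_byte ─ ret4 ─ pop rbx ─ ret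

  `digest_byte` is a leaf whose post says THE MEMORY IS UNCHANGED (`v.mem = u.mem`): after each call the memory of the returned
  state is restated as the memory at the call (`w_mem`: the entry memory with the saved `rbx` and the pushed return address), so
  the walker itself reads the two stack slots back at `pop rbx` / `ret`. Nothing is written but 16 bytes of stack.
-/

open X86 X86.User Asan ProgX.Base ProgX.Base.Spec Gif.Spec

set_option maxRecDepth 4000
set_option maxHeartbeats 4000000

/-- `digest_int` satisfies its contract: four calls of `digest_byte`, 16 bytes of stack written, `rbx` restored. -/
theorem Gif.Spec.Proved.digest_int_ok : Gif.Spec.digest_int.Statement := by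
  intro Lay hLay μ hμ u₀ hcode h_digest_byte u ret he hpre
  v_entry he
  -- 0x1052e0 (gif_driver.c:95) `push rbx ; mov ebx, esi` … 0x1052e3 (gif_driver.c:97) `call digest_byte`
  u_walk hcode [hμ.vendor] span [ProgX.Base.L.textLo, ProgX.Base.L.textHi] side (v_side)
  case call_inv =>
    v_inv
  case pre_1052e3 =>
    exact True.intro
  -- 0x1052e8 (ret1): `digest_byte` has returned; its post: the memory is the one at the call
  v_after_call w_rsp_1052e3 w_mem_1052e3
  have w_mem := (show s_1052e3r.mem = s_1052e3.mem from w_post).trans w_mem_1052e3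
  clear w_same w_post
  -- 0x1052e8 … 0x1052f0 (gif_driver.c:98) `call digest_byte` with `v >> 8`
  u_walk hcode [hμ.vendor] span [ProgX.Base.L.textLo, ProgX.Base.L.textHi] side (v_side)
  case call_inv =>
    v_inv
  case pre_1052f0 =>
    exact True.intro
  -- 0x1052f5 (ret2)
  v_after_call w_rsp_1052f0 w_mem_1052f0
  have w_mem := (show s_1052f0r.mem = s_1052f0.mem from w_post).trans w_mem_1052f0
  clear w_same w_post
  -- 0x1052f5 … 0x1052fd (gif_driver.c:99) `call digest_byte` with `v >> 16`
  u_walk hcode [hμ.vendor] span [ProgX.Base.L.textLo, ProgX.Base.L.textHi] side (v_side)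
  case call_inv =>
    v_inv
  case pre_1052fd =>
    exact True.intro
  -- 0x105302 (ret3)
  v_after_call w_rsp_1052fd w_mem_1052fd
  have w_mem := (show s_1052fdr.mem = s_1052fd.mem from w_post).trans w_mem_1052fd
  clear w_same w_post
  -- 0x105302 … 0x10530a (gif_driver.c:100) `call digest_byte` with `v >> 24`
  u_walk hcode [hμ.vendor] span [ProgX.Base.L.textLo, ProgX.Base.L.textHi] side (v_side)
  case call_inv =>
    v_inv
  case pre_10530a =>
    exact True.intro
  -- 0x10530f (ret4)
  v_after_call w_rsp_10530a w_mem_10530a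
  have w_mem := (show s_10530ar.mem = s_10530a.mem from w_post).trans w_mem_10530a
  clear w_same w_post
  -- 0x10530f (gif_driver.c:102) `pop rbx ; ret`
  u_walk hcode [hμ.vendor] span [ProgX.Base.L.textLo, ProgX.Base.L.textHi] side (v_side)
  refine ReachVia.done ?_
  v_returned
  -- the post is `True`
  exact True.intro
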